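-- pv_equiv track=rewrite | github.com/mtitze/lieops | lieops/solver/splitting.py | _get_indices_oi
-- ===== SOURCE A (Python) =====
-- def _get_indices_oi(comm, j, exclude, include):
--     max_elements = 2
--     k_of_interest = []
--     intersections = []
--     for k in include:
--         if k == j or k in exclude:
--             continue
--         intersection = set(comm[j]).intersection(set(comm[k])).intersection(include)
--         n_elements = len(intersection)
--         if n_elements > max_elements:
--             max_elements = n_elements
--             k_of_interest = [k]
--             intersections = [intersection]
--         elif n_elements == max_elements:
--             k_of_interest.append(k)
--             intersections.append(intersection)
--     return k_of_interest, intersections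
-- ===== SOURCE B (Python) =====
-- def _get_indices_oi(comm, j, exclude, include):
--     table = [(k, set(comm[j]).intersection(set(comm[k])).intersection(include))
--              for k in include if k != j and k not in exclude]
--     M = max((len(s) for _, s in table), default=0)
--     threshold = max(2, M)
--     k_of_interest = [k for k, s in table if len(s) == threshold]
--     intersections = [s for _, s in table if len(s) == threshold]
--     return k_of_interest, intersections
-- ===== Notes on version B (the rewrite author's own statement) =====
-- stated objective: alternative
-- what changed: Replaces the single-pass running-max-with-tie-reset loop by a build-table / reduce-to-max / filter-at-threshold decomposition: first collect (k, intersection) pairs, then threshold = max(2, max of sizes), then filter both output lists at that threshold.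
import Mathlib
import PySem

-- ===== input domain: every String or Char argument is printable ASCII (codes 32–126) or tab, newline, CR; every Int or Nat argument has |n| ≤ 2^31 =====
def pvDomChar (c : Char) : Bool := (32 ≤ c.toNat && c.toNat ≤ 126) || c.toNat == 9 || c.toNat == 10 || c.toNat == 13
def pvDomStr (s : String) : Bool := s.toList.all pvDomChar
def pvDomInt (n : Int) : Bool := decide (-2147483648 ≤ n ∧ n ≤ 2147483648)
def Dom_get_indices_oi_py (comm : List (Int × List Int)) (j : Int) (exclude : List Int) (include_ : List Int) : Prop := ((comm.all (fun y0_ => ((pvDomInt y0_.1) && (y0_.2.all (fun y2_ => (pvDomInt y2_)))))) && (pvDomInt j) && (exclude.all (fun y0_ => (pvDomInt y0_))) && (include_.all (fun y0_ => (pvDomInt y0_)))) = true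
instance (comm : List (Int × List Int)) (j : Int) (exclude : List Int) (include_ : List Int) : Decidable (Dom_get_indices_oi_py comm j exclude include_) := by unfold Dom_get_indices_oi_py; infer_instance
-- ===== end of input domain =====

-- ===== PORT A =====
-- B changes only the decomposition (table, then max, then filter) — same results, same cost; equivalence is on return values.
-- shared helper: the expression set(comm[j]).intersection(set(comm[k])).intersection(include), identical in both Pythons
-- (comm is an association list; comm[x] = first match, exists under Pre_)
def pvInterOf (comm : List (Int × List Int)) (j : Int) (include_ : List Int) (k : Int) : List Int :=
  PySem.Set.inter (PySem.Set.inter (PySem.Set.ofList ((comm.lookup j).getD [])) (PySem.Set.ofList ((comm.lookup k).getD []))) include_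

-- one iteration of A's loop body (state = (max_elements, k_of_interest, intersections))
def pvStepA (skip : Int → Bool) (f : Int → List Int) (st : Nat × List Int × List (List Int)) (k : Int) : Nat × List Int × List (List Int) :=
  if skip k then st
  else
    let inter := f k
    let n := inter.length
    if st.1 < n then (n, [k], [inter])
    else if n = st.1 then (st.1, st.2.1 ++ [k], st.2.2 ++ [inter])
    else st

def get_indices_oi_py (comm : List (Int × List Int)) (j : Int) (exclude : List Int) (include_ : List Int) : List Int × List (List Int) :=
  let st := include_.foldl (pvStepA (fun k => k == j || exclude.contains k) (pvInterOf comm j include_)) (2, [], [])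
  (st.2.1, st.2.2)

-- ===== PORT B =====
-- the table of (k, intersection) pairs for the keys that pass the filter
def pvTbl (skip : Int → Bool) (f : Int → List Int) (l : List Int) : List (Int × List Int) :=
  l.filterMap (fun k => if skip k then none else some (k, f k))

-- max(sizes, default=0)
def pvMaxLen (tbl : List (Int × List Int)) : Nat :=
  (tbl.map (fun p => p.2.length)).foldl max 0

def get_indices_oi_py_alt (comm : List (Int × List Int)) (j : Int) (exclude : List Int) (include_ : List Int) : List Int × List (List Int) :=
  let table := pvTbl (fun k => k == j || exclude.contains k) (pvInterOf comm j include_) include_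
  let threshold := max 2 (pvMaxLen table)
  ((table.filter (fun p => p.2.length = threshold)).map Prod.fst,
   (table.filter (fun p => p.2.length = threshold)).map Prod.snd)

-- ===== PRECONDITION & SPEC =====
-- Pre_ excludes exactly the inputs where Python A raises KeyError: some k in include passes the
-- k == j / k in exclude filter while j or k is not a key of comm.
def Pre_get_indices_oi_py (comm : List (Int × List Int)) (j : Int) (exclude : List Int) (include_ : List Int) : Prop :=
  ∀ k ∈ include_, k ≠ j → k ∉ exclude → (j ∈ comm.map Prod.fst ∧ k ∈ comm.map Prod.fst)
instance (comm : List (Int × List Int)) (j : Int) (exclude : List Int) (include_ : List Int) : Decidable (Pre_get_indices_oi_py comm j exclude include_) := by unfold Pre_get_indices_oi_py; infer_instance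

def pvWitness_get_indices_oi_py : (List (Int × List Int)) × Int × List Int × List Int :=
  ([(0, [1, 2, 3]), (1, [0, 2, 3]), (2, [0, 1, 3]), (3, [0, 1, 2])], 0, [], [0, 1, 2, 3])

def Spec_get_indices_oi_py (comm : List (Int × List Int)) (j : Int) (exclude : List Int) (include_ : List Int) (out : List Int × List (List Int)) : Prop := out = get_indices_oi_py_alt comm j exclude include_
instance (comm : List (Int × List Int)) (j : Int) (exclude : List Int) (include_ : List Int) (out : List Int × List (List Int)) : Decidable (Spec_get_indices_oi_py comm j exclude include_ out) := by unfold Spec_get_indices_oi_py; infer_instance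

-- ===== CLAIM (what is proved, stated in full; the proofs are below) =====
def Claim_equal_get_indices_oi_py : Prop := ∀ (comm : List (Int × List Int)) (j : Int) (exclude : List Int) (include_ : List Int), Dom_get_indices_oi_py comm j exclude include_ → Pre_get_indices_oi_py comm j exclude include_ → Spec_get_indices_oi_py comm j exclude include_ (get_indices_oi_py comm j exclude include_)

-- ===== LEMMAS AND PROOFS =====

lemma pvFoldlMaxInit (l : List Nat) (a : Nat) : l.foldl max a = max a (l.foldl max 0) := by
  induction l generalizing a with
  | nil => simp
  | cons x l ih =>
    simp only [List.foldl_cons]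
    rw [ih, ih (max 0 x)]
    omega

lemma pvTbl_cons_skip (skip : Int → Bool) (f : Int → List Int) (k : Int) (l : List Int)
    (h : skip k = true) : pvTbl skip f (k :: l) = pvTbl skip f l := by
  simp [pvTbl, h]

lemma pvTbl_cons_keep (skip : Int → Bool) (f : Int → List Int) (k : Int) (l : List Int)
    (h : ¬ skip k = true) : pvTbl skip f (k :: l) = (k, f k) :: pvTbl skip f l := by
  simp [pvTbl, h]

lemma pvMaxLen_cons (p : Int × List Int) (tbl : List (Int × List Int)) :
    pvMaxLen (p :: tbl) = max p.2.length (pvMaxLen tbl) := by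
  simp only [pvMaxLen, List.map_cons, List.foldl_cons]
  rw [pvFoldlMaxInit]
  omega

-- characterisation of A's loop: from state (m, ks, ints) it returns the entries of the table
-- whose size equals max m M (M = max table size), appended to ks/ints iff no size exceeded m.
lemma pvLoopChar (skip : Int → Bool) (f : Int → List Int) :
    ∀ (rest : List Int) (m : Nat) (ks : List Int) (ints : List (List Int)),
    rest.foldl (pvStepA skip f) (m, ks, ints) =
      (max m (pvMaxLen (pvTbl skip f rest)),
       (if m < pvMaxLen (pvTbl skip f rest) then [] else ks) ++
         ((pvTbl skip f rest).filter (fun p => p.2.length = max m (pvMaxLen (pvTbl skip f rest)))).map Prod.fst,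
       (if m < pvMaxLen (pvTbl skip f rest) then [] else ints) ++
         ((pvTbl skip f rest).filter (fun p => p.2.length = max m (pvMaxLen (pvTbl skip f rest)))).map Prod.snd) := by
  intro rest
  induction rest with
  | nil => intro m ks ints; simp [pvTbl, pvMaxLen]
  | cons k rest ih =>
    intro m ks ints
    by_cases hs : skip k
    · rw [List.foldl_cons, pvTbl_cons_skip skip f k rest hs]
      have hst : pvStepA skip f (m, ks, ints) k = (m, ks, ints) := by
        simp [pvStepA, hs]
      rw [hst, ih]
    · rw [List.foldl_cons, pvTbl_cons_keep skip f k rest hs, pvMaxLen_cons]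
      set n := (f k).length with hn
      set M := pvMaxLen (pvTbl skip f rest) with hM
      set tbl := pvTbl skip f rest with htbl
      have hfilter : ∀ (t : Nat), ((k, f k) :: tbl).filter (fun p => p.2.length = t) =
          (if n = t then [(k, f k)] else []) ++ tbl.filter (fun p => p.2.length = t) := by
        intro t
        by_cases h : n = t <;> simp [← hn, h]
      have hst : pvStepA skip f (m, ks, ints) k =
          (if m < n then ((n : Nat), ([k] : List Int), ([f k] : List (List Int)))
           else if n = m then (m, ks ++ [k], ints ++ [f k]) else (m, ks, ints)) := by
        simp only [pvStepA, hs]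
        split <;> split <;> simp_all
      rw [hst]
      by_cases h1 : m < n
      · rw [if_pos h1, ih]
        have ht : max n M = max m (max n M) := by omega
        rw [← ht, hfilter]
        by_cases h2 : n < M
        · have e1 : max n M = M := by omega
          have e2 : (n = max n M) = False := by simp; omega
          have e3 : (n < M) = True := by simp [h2]
          rw [e1] at *
          simp only [e2, if_false, e3, if_true, List.nil_append]
          have hmM : m < M := by omega
          simp [hmM]
        · have e1 : max n M = n := by omega
          have e2 : (n < M) = False := by simp; omega
          rw [e1] at *
          simp [h1, e2]
      · rw [if_neg h1]
        by_cases h2 : n = m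
        · rw [if_pos h2, ih]
          have ht : max m M = max m (max n M) := by omega
          rw [← ht, hfilter]
          by_cases h3 : m < M
          · have e2 : (n = max m M) = False := by simp; omega
            have e3 : (m < max n M) = (m < M) := by simp; omega
            simp only [e2, if_false, e3, h3, if_true, List.nil_append]
          · have e1 : max m M = m := by omega
            have e3 : (m < max n M) = (m < M) := by simp; omega
            rw [e1] at *
            have hmm : ¬ m < max m M := by omega
            simp [h2, hmm, h3]
        · have h4 : n < m := by omega
          rw [if_neg h2, ih]
          have ht : max m M = max m (max n M) := by omega
          rw [← ht, hfilter]
          have e2 : (n = max m M) = False := by simp; omega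
          have e3 : (m < max n M) = (m < M) := by simp; omega
          simp only [e2, if_false, e3, List.nil_append]

-- ===== VERDICT (by name: the statement is the Claim_ definition above) =====
theorem get_indices_oi_py_spec : Claim_equal_get_indices_oi_py := by
  intro comm j exclude include_ _ _
  show get_indices_oi_py comm j exclude include_ = get_indices_oi_py_alt comm j exclude include_
  unfold get_indices_oi_py get_indices_oi_py_alt
  rw [pvLoopChar]
  simp only [ite_self, List.nil_append]
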